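-- pv_equiv track=rewrite | github.com/mumianyuxin/M3DSSD | scripts/train_rpn_3d.py | gen_eval
-- ===== SOURCE A (Python) =====
-- def gen_eval(eval_epoch, max_epoch):
--     epochs = []
--     epoch = int(eval_epoch)
--     epochs.append(epoch)
--
--     while(epoch < max_epoch):
--        eval_epoch = int(max(eval_epoch*0.5, 1))
--        epoch += eval_epoch
--        epochs.append(epoch)
--
--     return epochs
-- ===== SOURCE B (Python) =====
-- def gen_eval(eval_epoch, max_epoch):
--     epoch = int(eval_epoch)
--     epochs = [epoch]
--     step = int(eval_epoch)
--     # geometric-decay phase: run only while the halved step is still > 1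
--     while epoch < max_epoch and step >= 4:
--         step //= 2
--         epoch += step
--         epochs.append(epoch)
--     # arithmetic tail: once the step has decayed to 1, the rest is consecutive
--     if epoch < max_epoch:
--         epochs.extend(range(epoch + 1, max_epoch + 1))
--     return epochs
-- ===== Notes on version B (the rewrite author's own statement) =====
-- stated objective: alternative
-- what changed: B splits A's single homogeneous while-loop into a geometric halving phase (run only while the decayed step still exceeds 1) plus one bulk range() extension for the arithmetic step-1 tail.
import Mathlib
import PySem

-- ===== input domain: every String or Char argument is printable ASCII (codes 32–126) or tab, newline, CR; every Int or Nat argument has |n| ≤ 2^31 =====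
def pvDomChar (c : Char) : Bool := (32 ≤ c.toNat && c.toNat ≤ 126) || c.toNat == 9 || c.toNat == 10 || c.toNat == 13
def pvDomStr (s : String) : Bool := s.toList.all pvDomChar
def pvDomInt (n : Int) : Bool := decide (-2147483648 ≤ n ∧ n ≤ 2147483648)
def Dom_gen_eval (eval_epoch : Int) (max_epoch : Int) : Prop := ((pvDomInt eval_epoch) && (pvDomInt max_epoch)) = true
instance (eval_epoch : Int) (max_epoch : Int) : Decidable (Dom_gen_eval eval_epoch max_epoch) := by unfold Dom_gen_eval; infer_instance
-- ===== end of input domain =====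

-- B replaces A's single homogeneous while-loop by a geometric halving phase plus one
-- bulk range() extension for the step-1 arithmetic tail (alternative decomposition;
-- equal return values).

-- ===== PORT A =====
-- A's loop: while epoch < max_epoch: ev = int(max(ev*0.5, 1)); epoch += ev; append.
-- For |ev| ≤ 2^31 the float product ev*0.5 is exact, so int(max(ev*0.5, 1)) = max (ev.tdiv 2) 1
-- (truncation toward zero, as Python's int() on a float).
def genEvalLoopA (max_epoch ev epoch : Int) (acc : List Int) : List Int :=
  if h : epoch < max_epoch then
    genEvalLoopA max_epoch (max (ev.tdiv 2) 1) (epoch + max (ev.tdiv 2) 1)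
      (acc ++ [epoch + max (ev.tdiv 2) 1])
  else acc
termination_by (max_epoch - epoch).toNat
decreasing_by
  have hs : 1 ≤ max (ev.tdiv 2) 1 := le_max_right _ _
  omega

def gen_eval (eval_epoch : Int) (max_epoch : Int) : List Int :=
  genEvalLoopA max_epoch eval_epoch eval_epoch [eval_epoch]

-- ===== PORT B =====
-- B's halving loop: while epoch < max_epoch and step >= 4: step //= 2; epoch += step; append.
-- (for step ≥ 4, step // 2 = step.tdiv 2). Returns the final epoch and the list so far.
def genEvalLoopB (max_epoch step epoch : Int) (acc : List Int) : Int × List Int :=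
  if h : epoch < max_epoch ∧ 4 ≤ step then
    genEvalLoopB max_epoch (step.tdiv 2) (epoch + step.tdiv 2) (acc ++ [epoch + step.tdiv 2])
  else (epoch, acc)
termination_by (max_epoch - epoch).toNat
decreasing_by
  have h2 : step.tdiv 2 = step / 2 := Int.tdiv_eq_ediv_of_nonneg (by omega)
  omega

def gen_eval_alt (eval_epoch : Int) (max_epoch : Int) : List Int :=
  let p := genEvalLoopB max_epoch eval_epoch eval_epoch [eval_epoch]
  if p.1 < max_epoch then p.2 ++ PySem.List.pyRange (p.1 + 1) (max_epoch + 1) 1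
  else p.2

-- ===== PRECONDITION & SPEC =====
def Spec_gen_eval (eval_epoch : Int) (max_epoch : Int) (out : List Int) : Prop := out = gen_eval_alt eval_epoch max_epoch
instance (eval_epoch : Int) (max_epoch : Int) (out : List Int) : Decidable (Spec_gen_eval eval_epoch max_epoch out) := by unfold Spec_gen_eval; infer_instance

-- ===== CLAIM (what is proved, stated in full; the proofs are below) =====
def Claim_equal_gen_eval : Prop := ∀ (eval_epoch : Int) (max_epoch : Int), Dom_gen_eval eval_epoch max_epoch → Spec_gen_eval eval_epoch max_epoch (gen_eval eval_epoch max_epoch)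

-- ===== LEMMAS AND PROOFS =====

theorem tdiv2_le_one (ev : Int) (hev : ev ≤ 3) : ev.tdiv 2 ≤ 1 := by
  by_cases h : 0 ≤ ev
  · rw [Int.tdiv_eq_ediv_of_nonneg h]; omega
  · have h1 : ev = -(-ev) := by ring
    rw [h1, Int.neg_tdiv]
    have : 0 ≤ (-ev).tdiv 2 := Int.tdiv_nonneg (by omega) (by norm_num)
    omega

-- once A's step has decayed to 1 (ev ≤ 3), A's loop is the arithmetic tail
theorem loopA_tail (max_epoch : Int) (n : Nat) :
    ∀ (ev epoch : Int) (acc : List Int), (max_epoch - epoch).toNat ≤ n → ev ≤ 3 →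
      genEvalLoopA max_epoch ev epoch acc =
        acc ++ PySem.List.pyRange (epoch + 1) (max_epoch + 1) 1 := by
  induction n with
  | zero =>
    intro ev epoch acc hn hev
    rw [genEvalLoopA, dif_neg (by omega), PySem.List.pyRange_one_eq_nil (by omega),
      List.append_nil]
  | succ n ih =>
    intro ev epoch acc hn hev
    by_cases hlt : epoch < max_epoch
    · rw [genEvalLoopA, dif_pos hlt]
      have hstep : max (ev.tdiv 2) 1 = 1 := by
        have := tdiv2_le_one ev hev
        omega
      rw [hstep, ih 1 (epoch + 1) (acc ++ [epoch + 1]) (by omega) (by omega),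
        PySem.List.pyRange_one_cons (a := epoch + 1) (b := max_epoch + 1) (by omega)]
      simp
    · rw [genEvalLoopA, dif_neg hlt, PySem.List.pyRange_one_eq_nil (by omega),
        List.append_nil]

theorem loopA_eq_loopB (max_epoch : Int) (n : Nat) :
    ∀ (ev epoch : Int) (acc : List Int), (max_epoch - epoch).toNat ≤ n →
      genEvalLoopA max_epoch ev epoch acc =
        (let p := genEvalLoopB max_epoch ev epoch acc
         if p.1 < max_epoch then p.2 ++ PySem.List.pyRange (p.1 + 1) (max_epoch + 1) 1
         else p.2) := by
  induction n with
  | zero =>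
    intro ev epoch acc hn
    rw [genEvalLoopA, dif_neg (by omega), genEvalLoopB, dif_neg (by omega)]
    dsimp only
    rw [if_neg (by omega)]
  | succ n ih =>
    intro ev epoch acc hn
    by_cases h : epoch < max_epoch ∧ 4 ≤ ev
    · have htd : ev.tdiv 2 = ev / 2 := Int.tdiv_eq_ediv_of_nonneg (by omega)
      have hs2 : 2 ≤ ev.tdiv 2 := by omega
      rw [genEvalLoopA, dif_pos h.1, genEvalLoopB, dif_pos h]
      have hstep : max (ev.tdiv 2) 1 = ev.tdiv 2 := by omega
      rw [hstep]
      exact ih (ev.tdiv 2) (epoch + ev.tdiv 2) (acc ++ [epoch + ev.tdiv 2]) (by omega)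
    · rw [genEvalLoopB, dif_neg h]
      dsimp only
      by_cases hlt : epoch < max_epoch
      · rw [if_pos hlt]
        exact loopA_tail max_epoch (max_epoch - epoch).toNat ev epoch acc le_rfl (by omega)
      · rw [if_neg hlt, genEvalLoopA, dif_neg hlt]

-- ===== VERDICT (by name: the statement is the Claim_ definition above) =====
theorem gen_eval_spec : Claim_equal_gen_eval := by
  intro eval_epoch max_epoch _
  unfold Spec_gen_eval gen_eval gen_eval_alt
  exact loopA_eq_loopB max_epoch (max_epoch - eval_epoch).toNat eval_epoch eval_epoch
    [eval_epoch] le_rfl
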